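-- pv_equiv track=rewrite | github.com/agecspnt/binpacking2 | 2.py | get_strong_pairs
-- ===== SOURCE A (Python) =====
-- def get_strong_pairs(matrix, threshold=50):
--     """找出所有强连接对"""
--     pairs = []
--     n = len(matrix)
--     used_nodes = set()
--
--     # 按强度从高到低排序所有连接
--     connections = []
--     for i in range(n):
--         for j in range(n):
--             if i != j and matrix[i][j] >= threshold:
--                 connections.append((i, j, matrix[i][j]))
--
--     # 按强度排序
--     connections.sort(key=lambda x: x[2], reverse=True)
--
--     # 收集强连接对，避免节点重复使用
--     for i, j, strength in connections:
--         if i not in used_nodes and j not in used_nodes: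
--             pairs.append((i, j, strength))
--             used_nodes.add(i)
--             used_nodes.add(j)
--
--     return pairs, used_nodes
-- ===== SOURCE B (Python) =====
-- def get_strong_pairs(matrix, threshold=50):
--     """Repeated maximum-selection: each round scan the matrix (row-major) for the
--     strongest still-available edge (strict '>' keeps the first among ties, which
--     matches the stable sort-then-greedy order), instead of building and sorting
--     the full connection list."""
--     n = len(matrix)
--     pairs = []
--     used_nodes = set()
--     while True:
--         best = None
--         for i in range(n):
--             row = matrix[i]
--             for j in range(n):
--                 if i != j and row[j] >= threshold:
--                     if i not in used_nodes and j not in used_nodes: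
--                         if best is None or row[j] > best[2]:
--                             best = (i, j, row[j])
--         if best is None:
--             break
--         pairs.append(best)
--         used_nodes.add(best[0])
--         used_nodes.add(best[1])
--     return pairs, used_nodes
-- ===== Notes on version B (the rewrite author's own statement) =====
-- stated objective: alternative
-- what changed: Replaces build-all-connections + stable descending sort + one greedy pass with a repeated maximum-selection loop that rescans the matrix each round for the strongest still-available edge (strict '>' so the first row-major edge wins ties), appending it and marking its endpoints used until none qualifies.
import Mathlib
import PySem

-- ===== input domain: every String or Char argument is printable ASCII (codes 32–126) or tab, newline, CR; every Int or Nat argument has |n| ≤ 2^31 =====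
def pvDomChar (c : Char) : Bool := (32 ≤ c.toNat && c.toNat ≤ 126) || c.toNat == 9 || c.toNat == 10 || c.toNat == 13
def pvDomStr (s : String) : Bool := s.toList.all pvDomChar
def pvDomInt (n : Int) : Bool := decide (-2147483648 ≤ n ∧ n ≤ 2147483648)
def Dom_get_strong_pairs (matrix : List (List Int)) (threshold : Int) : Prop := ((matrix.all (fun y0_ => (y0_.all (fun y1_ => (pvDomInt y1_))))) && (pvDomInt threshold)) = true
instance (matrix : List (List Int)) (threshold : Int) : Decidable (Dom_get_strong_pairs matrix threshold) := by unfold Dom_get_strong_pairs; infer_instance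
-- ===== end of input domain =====

-- B replaces A's build-all-connections + stable descending sort + greedy pass with a repeated
-- maximum-selection loop over the matrix (strict '>' keeps the first row-major edge among ties);
-- alternative decomposition, same results.


-- ===== PORT A =====
-- matrix[i][j] is ported with pyGetD; Pre_get_strong_pairs guarantees every access is in range
-- (outside Pre_ the Python raises IndexError).
def get_strong_pairs (matrix : List (List Int)) (threshold : Int) : (List (Int × Int × Int)) × List Int :=
  let n : Int := (matrix.length : Int)
  let connections : List (Int × Int × Int) :=
    (PySem.List.pyRange 0 n 1).foldl (fun acc i =>
      (PySem.List.pyRange 0 n 1).foldl (fun acc j =>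
        if i ≠ j ∧ PySem.List.pyGetD (PySem.List.pyGetD matrix i []) j 0 ≥ threshold then
          acc ++ [(i, j, PySem.List.pyGetD (PySem.List.pyGetD matrix i []) j 0)]
        else acc) acc) []
  let connections := PySem.List.sorted connections (fun x => x.2.2) true
  connections.foldl (fun (st : List (Int × Int × Int) × PySem.Set Int) c =>
      if c.1 ∉ st.2 ∧ c.2.1 ∉ st.2 then
        (st.1 ++ [c], PySem.Set.add (PySem.Set.add st.2 c.1) c.2.1)
      else st) ([], PySem.Set.empty)

-- ===== PORT B =====
-- one round of Source B's 'while True' body: scan for the strongest still-available edge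
def pvBestScan (matrix : List (List Int)) (threshold : Int) (used : PySem.Set Int) : Option (Int × Int × Int) :=
  let n : Int := (matrix.length : Int)
  (PySem.List.pyRange 0 n 1).foldl (fun best i =>
    let row := PySem.List.pyGetD matrix i []
    (PySem.List.pyRange 0 n 1).foldl (fun best j =>
      if i ≠ j ∧ PySem.List.pyGetD row j 0 ≥ threshold then
        if i ∉ used ∧ j ∉ used then
          match best with
          | none => some (i, j, PySem.List.pyGetD row j 0)
          | some b => if PySem.List.pyGetD row j 0 > b.2.2 then some (i, j, PySem.List.pyGetD row j 0) else best
        else best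
      else best) best) none

-- Source B's 'while True' loop; the fuel only makes it total: each round blocks at least one of the
-- at most n*n qualifying edges, so the loop exits within the fuel (proved below in the main lemma).
def pvLoop (matrix : List (List Int)) (threshold : Int) :
    Nat → (List (Int × Int × Int)) × PySem.Set Int → (List (Int × Int × Int)) × PySem.Set Int
  | 0, st => st
  | fuel + 1, (pairs, used) =>
    match pvBestScan matrix threshold used with
    | none => (pairs, used)
    | some b => pvLoop matrix threshold fuel (pairs ++ [b], PySem.Set.add (PySem.Set.add used b.1) b.2.1)

def get_strong_pairs_alt (matrix : List (List Int)) (threshold : Int) : (List (Int × Int × Int)) × List Int :=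
  pvLoop matrix threshold (matrix.length * matrix.length + 1) ([], PySem.Set.empty)

-- ===== PRECONDITION & SPEC =====
-- Pre_: exactly the inputs where A returns: matrix[i][j] is only evaluated for i ≠ j (Python's
-- 'and' short-circuits), and must then be in range; otherwise Python raises IndexError.
def Pre_get_strong_pairs (matrix : List (List Int)) (threshold : Int) : Prop :=
  ∀ i < matrix.length, ∀ j < matrix.length, i ≠ j → j < (matrix.getD i []).length
instance (matrix : List (List Int)) (threshold : Int) : Decidable (Pre_get_strong_pairs matrix threshold) := by unfold Pre_get_strong_pairs; infer_instance
def pvWitness_get_strong_pairs : List (List Int) × Int := ([[0, 60], [70, 0]], 50)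
def Spec_get_strong_pairs (matrix : List (List Int)) (threshold : Int) (out : (List (Int × Int × Int)) × List Int) : Prop := out = get_strong_pairs_alt matrix threshold
instance (matrix : List (List Int)) (threshold : Int) (out : (List (Int × Int × Int)) × List Int) : Decidable (Spec_get_strong_pairs matrix threshold out) := by unfold Spec_get_strong_pairs; infer_instance

-- ===== CLAIM (what is proved, stated in full; the proofs are below) =====
def Claim_equal_get_strong_pairs : Prop := ∀ (matrix : List (List Int)) (threshold : Int), Dom_get_strong_pairs matrix threshold → Pre_get_strong_pairs matrix threshold → Spec_get_strong_pairs matrix threshold (get_strong_pairs matrix threshold)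

-- ===== LEMMAS AND PROOFS =====

-- the row-major list of qualifying edges (both ports traverse exactly this list)
def pvCand (matrix : List (List Int)) (threshold : Int) : List (Int × Int × Int) :=
  (PySem.List.pyRange 0 (matrix.length : Int) 1).flatMap (fun i =>
    ((PySem.List.pyRange 0 (matrix.length : Int) 1).filter
        (fun j => decide (i ≠ j ∧ PySem.List.pyGetD (PySem.List.pyGetD matrix i []) j 0 ≥ threshold))).map
      (fun j => (i, j, PySem.List.pyGetD (PySem.List.pyGetD matrix i []) j 0)))

def pvFree (u : PySem.Set Int) (c : Int × Int × Int) : Bool :=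
  decide (c.1 ∉ u ∧ c.2.1 ∉ u)

def pvStep (best : Option (Int × Int × Int)) (c : Int × Int × Int) : Option (Int × Int × Int) :=
  match best with
  | none => some c
  | some b => if c.2.2 > b.2.2 then some c else best

def pvGStep (st : (List (Int × Int × Int)) × PySem.Set Int) (c : Int × Int × Int) :
    (List (Int × Int × Int)) × PySem.Set Int :=
  if c.1 ∉ st.2 ∧ c.2.1 ∉ st.2 then
    (st.1 ++ [c], PySem.Set.add (PySem.Set.add st.2 c.1) c.2.1)
  else st

theorem pvFree_mono (u : PySem.Set Int) (a c : Int × Int × Int) (h : pvFree u c = false) :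
    pvFree (PySem.Set.add (PySem.Set.add u a.1) a.2.1) c = false := by
  simp [pvFree, PySem.Set.mem_add] at *; tauto
theorem pvFree_add_self (u : PySem.Set Int) (c : Int × Int × Int) :
    pvFree (PySem.Set.add (PySem.Set.add u c.1) c.2.1) c = false := by
  simp [pvFree, PySem.Set.mem_add]
theorem gstep_not_free (st : (List (Int × Int × Int)) × PySem.Set Int) (c : Int × Int × Int)
    (h : pvFree st.2 c = false) : pvGStep st c = st := by
  unfold pvGStep; rw [if_neg (of_decide_eq_false h)]
theorem gstep_free (st : (List (Int × Int × Int)) × PySem.Set Int) (c : Int × Int × Int)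
    (h : pvFree st.2 c = true) :
    pvGStep st c = (st.1 ++ [c], PySem.Set.add (PySem.Set.add st.2 c.1) c.2.1) := by
  unfold pvGStep; rw [if_pos (of_decide_eq_true h)]
theorem greedy_skip (s : List (Int × Int × Int)) (st : (List (Int × Int × Int)) × PySem.Set Int)
    (h : ∀ c ∈ s, pvFree st.2 c = false) :
    s.foldl pvGStep st = st := by
  induction s with
  | nil => rfl
  | cons c t ih =>
    simp only [List.foldl_cons, gstep_not_free st c (h c (by simp))]
    exact ih (fun c hc => h c (by simp [hc]))
theorem greedy_find (s : List (Int × Int × Int)) (p : List (Int × Int × Int)) (u : PySem.Set Int)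
    (c : Int × Int × Int) (h : s.find? (pvFree u) = some c) :
    s.foldl pvGStep (p, u) =
      s.foldl pvGStep (p ++ [c], PySem.Set.add (PySem.Set.add u c.1) c.2.1) := by
  induction s generalizing p with
  | nil => simp at h
  | cons x t ih =>
    by_cases hx : pvFree u x = true
    · rw [List.find?_cons_of_pos hx] at h
      injection h with h; subst h
      simp only [List.foldl_cons, gstep_free (p, u) x hx,
        gstep_not_free (p ++ [x], PySem.Set.add (PySem.Set.add u x.1) x.2.1) x
          (pvFree_add_self u x)]
    · have hx' : pvFree u x = false := by simpa using hx
      rw [List.find?_cons_of_neg (by simp [hx'])] at h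
      simp only [List.foldl_cons, gstep_not_free (p, u) x hx',
        gstep_not_free (p ++ [c], PySem.Set.add (PySem.Set.add u c.1) c.2.1) x
          (pvFree_mono u c x hx')]
      exact ih p h
theorem filter_length_lt {α : Type} (l : List α) (p q : α → Bool)
    (himp : ∀ x, q x = true → p x = true) (c : α) (hc : c ∈ l) (hp : p c = true)
    (hq : q c = false) : (l.filter q).length < (l.filter p).length := by
  have hle : ∀ (t : List α), (t.filter q).length ≤ (t.filter p).length :=
    fun t => (List.monotone_filter_right t himp).length_le
  induction l with
  | nil => simp at hc
  | cons x t ih =>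
    simp only [List.filter_cons]
    rcases List.mem_cons.mp hc with h | h
    · subst h
      simp only [hp, hq, if_true, Bool.false_eq_true, if_false]
      simpa using Nat.lt_succ_of_le (hle t)
    · have ihh := ih h
      by_cases hqx : q x = true
      · simp [hqx, himp x hqx, ihh]
      · simp only [Bool.not_eq_true] at hqx
        simp only [hqx, Bool.false_eq_true, if_false]
        cases hpx : p x
        · simpa using ihh
        · simp only [if_true]
          exact Nat.lt_succ_of_lt ihh

theorem foldl_pvStep_eq_head (l : List (Int × Int × Int)) :
    l.foldl pvStep none = (PySem.List.sorted l (fun c => c.2.2) true).head? := by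
  induction l using List.reverseRecOn with
  | nil => rfl
  | append_singleton l x ih =>
    rw [List.foldl_append, List.foldl_cons, List.foldl_nil, ih,
      PySem.List.sorted_rev_eq_foldl_insertBy (l ++ [x]) (fun c => c.2.2), List.foldl_append,
      List.foldl_cons, List.foldl_nil, ← PySem.List.sorted_rev_eq_foldl_insertBy l (fun c => c.2.2)]
    cases hs : PySem.List.sorted l (fun c => c.2.2) true with
    | nil => rfl
    | cons z t =>
      simp only [List.head?_cons, PySem.List.insertBy]
      by_cases hzx : z.2.2 < x.2.2
      · simp [pvStep, hzx]
      · simp [pvStep, hzx]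

theorem filter_insertBy (p : (Int × Int × Int) → Bool) (x : Int × Int × Int)
    (ys : List (Int × Int × Int))
    (hs : ys.Pairwise (fun a b => b.2.2 ≤ a.2.2)) :
    (PySem.List.insertBy (fun a b => decide (b.2.2 < a.2.2)) x ys).filter p =
      if p x then PySem.List.insertBy (fun a b => decide (b.2.2 < a.2.2)) x (ys.filter p)
      else ys.filter p := by
  induction ys with
  | nil => cases hpx : p x <;> simp [PySem.List.insertBy, hpx]
  | cons y t ih =>
    have hpt := (List.pairwise_cons.mp hs).2
    have hyt := (List.pairwise_cons.mp hs).1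
    by_cases hyx : y.2.2 < x.2.2
    · -- x is inserted in front
      rw [show PySem.List.insertBy (fun a b => decide (b.2.2 < a.2.2)) x (y :: t)
            = x :: y :: t by simp [PySem.List.insertBy, hyx]]
      cases hpx : p x
      · simp only [List.filter_cons, hpx, Bool.false_eq_true, if_false]
      · cases hpy : p y
        · -- y dropped: need insertBy x (filter t) = x :: filter t (all of filter t below x)
          simp only [List.filter_cons, hpx, hpy, if_true, Bool.false_eq_true, if_false]
          cases hft : t.filter p with
          | nil => simp [PySem.List.insertBy]
          | cons z r =>
            have hz : z ∈ t := List.mem_of_mem_filter (hft ▸ List.mem_cons_self)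
            have : z.2.2 < x.2.2 := lt_of_le_of_lt (hyt z hz) hyx
            simp [PySem.List.insertBy, this]
        · simp only [List.filter_cons, hpx, hpy, if_true]
          simp [PySem.List.insertBy, hyx]
    · -- x goes after y
      rw [show PySem.List.insertBy (fun a b => decide (b.2.2 < a.2.2)) x (y :: t)
            = y :: PySem.List.insertBy (fun a b => decide (b.2.2 < a.2.2)) x t by
          simp [PySem.List.insertBy, hyx]]
      cases hpy : p y
      · simp only [List.filter_cons, hpy, Bool.false_eq_true, if_false]
        exact ih hpt
      · simp only [List.filter_cons, hpy, if_true]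
        rw [ih hpt]
        cases hpx : p x
        · simp
        · simp only [if_true]
          simp [PySem.List.insertBy, hyx]

theorem sorted_filter (p : (Int × Int × Int) → Bool) (l : List (Int × Int × Int)) :
    PySem.List.sorted (l.filter p) (fun c => c.2.2) true =
      (PySem.List.sorted l (fun c => c.2.2) true).filter p := by
  induction l using List.reverseRecOn with
  | nil => rfl
  | append_singleton l x ih =>
    rw [List.filter_append, PySem.List.sorted_rev_eq_foldl_insertBy (l.filter p ++ _),
      List.foldl_append, ← PySem.List.sorted_rev_eq_foldl_insertBy,
      PySem.List.sorted_rev_eq_foldl_insertBy (l ++ [x]), List.foldl_append, List.foldl_cons,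
      List.foldl_nil, ← PySem.List.sorted_rev_eq_foldl_insertBy,
      filter_insertBy p x _ (PySem.List.sorted_pairwise_rev l (fun c => c.2.2))]
    cases hpx : p x
    · simp [hpx, ih]
    · simp only [List.filter_cons, hpx, List.filter_nil, if_true, List.foldl_cons, List.foldl_nil, ih]

theorem getA_eq (matrix : List (List Int)) (threshold : Int) :
    get_strong_pairs matrix threshold =
      (PySem.List.sorted (pvCand matrix threshold) (fun c => c.2.2) true).foldl pvGStep
        ([], PySem.Set.empty) := by
  unfold get_strong_pairs pvCand
  simp only [PySem.List.foldl_append_ite, PySem.List.foldl_append_eq_flatMap, List.nil_append]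
  rfl

theorem bestScan_eq (matrix : List (List Int)) (threshold : Int) (u : PySem.Set Int) :
    pvBestScan matrix threshold u =
      ((pvCand matrix threshold).filter (pvFree u)).foldl pvStep none := by
  unfold pvBestScan pvCand
  dsimp only
  rw [show (fun (best : Option (Int × Int × Int)) i =>
        (PySem.List.pyRange 0 (matrix.length : Int) 1).foldl (fun best j =>
          if i ≠ j ∧ PySem.List.pyGetD (PySem.List.pyGetD matrix i []) j 0 ≥ threshold then
            if i ∉ u ∧ j ∉ u then
              match best with
              | none => some (i, j, PySem.List.pyGetD (PySem.List.pyGetD matrix i []) j 0)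
              | some b => if PySem.List.pyGetD (PySem.List.pyGetD matrix i []) j 0 > b.2.2 then
                  some (i, j, PySem.List.pyGetD (PySem.List.pyGetD matrix i []) j 0) else best
            else best
          else best) best)
      = (fun best i =>
          (((PySem.List.pyRange 0 (matrix.length : Int) 1).filter
              (fun j => decide (i ≠ j ∧ PySem.List.pyGetD (PySem.List.pyGetD matrix i []) j 0 ≥ threshold))).map
            (fun j => (i, j, PySem.List.pyGetD (PySem.List.pyGetD matrix i []) j 0))).foldl
            (fun best c => if c.1 ∉ u ∧ c.2.1 ∉ u then pvStep best c else best) best) from by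
      funext best i
      rw [List.foldl_map]
      rw [← PySem.List.foldl_ite_eq_foldl_filter
        (fun j => i ≠ j ∧ PySem.List.pyGetD (PySem.List.pyGetD matrix i []) j 0 ≥ threshold)
        (fun best j => if i ∉ u ∧ j ∉ u then pvStep best (i, j, PySem.List.pyGetD (PySem.List.pyGetD matrix i []) j 0) else best)]
      rfl]
  rw [← List.foldl_flatMap]
  rw [PySem.List.foldl_ite_eq_foldl_filter (fun c => c.1 ∉ u ∧ c.2.1 ∉ u) pvStep]
  rfl

theorem flatMap_length_le {α β : Type} (L : List α) (f : α → List β) (K : Nat)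
    (h : ∀ x ∈ L, (f x).length ≤ K) : (L.flatMap f).length ≤ L.length * K := by
  induction L with
  | nil => simp
  | cons a t ih =>
    rw [List.flatMap_cons, List.length_append, List.length_cons, Nat.succ_mul, Nat.add_comm (t.length * K) K]
    exact Nat.add_le_add (h a (by simp)) (ih (fun x hx => h x (by simp [hx])))

theorem cand_length_le (matrix : List (List Int)) (threshold : Int) :
    (pvCand matrix threshold).length ≤ matrix.length * matrix.length := by
  unfold pvCand
  have hlen : (PySem.List.pyRange 0 (matrix.length : Int) 1).length = matrix.length := by
    rw [PySem.List.pyRange_zero_natCast]; simp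
  calc (_ : List (Int × Int × Int)).length
      ≤ (PySem.List.pyRange 0 (matrix.length : Int) 1).length * matrix.length := by
        apply flatMap_length_le
        intro i _
        rw [List.length_map]
        calc (List.filter _ _).length ≤ (PySem.List.pyRange 0 (matrix.length : Int) 1).length :=
              List.length_filter_le _ _
          _ = matrix.length := hlen
    _ = matrix.length * matrix.length := by rw [hlen]

-- MAIN: the greedy pass over the sorted list equals the repeated-max loop
theorem main_lemma (matrix : List (List Int)) (threshold : Int) :
    ∀ (fuel : Nat) (p : List (Int × Int × Int)) (u : PySem.Set Int),
      ((pvCand matrix threshold).filter (pvFree u)).length < fuel →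
      (PySem.List.sorted (pvCand matrix threshold) (fun c => c.2.2) true).foldl pvGStep (p, u) =
        pvLoop matrix threshold fuel (p, u) := by
  intro fuel
  induction fuel with
  | zero => intro p u h; omega
  | succ fuel ih =>
    intro p u h
    have hbs : pvBestScan matrix threshold u =
        (PySem.List.sorted (pvCand matrix threshold) (fun c => c.2.2) true).find? (pvFree u) := by
      rw [bestScan_eq, foldl_pvStep_eq_head, sorted_filter, List.head?_filter]
    cases hfind : (PySem.List.sorted (pvCand matrix threshold) (fun c => c.2.2) true).find? (pvFree u) with
    | none =>
      rw [show pvLoop matrix threshold (fuel + 1) (p, u) = (p, u) by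
        simp [pvLoop, hbs, hfind]]
      exact greedy_skip _ (p, u) (fun c hc => by simpa using List.find?_eq_none.mp hfind c hc)
    | some c =>
      have hmem : c ∈ pvCand matrix threshold :=
        (PySem.List.mem_sorted _ _ _ c).mp (List.mem_of_find?_eq_some hfind)
      have hfreec : pvFree u c = true := List.find?_some hfind
      rw [show pvLoop matrix threshold (fuel + 1) (p, u)
            = pvLoop matrix threshold fuel (p ++ [c], PySem.Set.add (PySem.Set.add u c.1) c.2.1) by
        simp [pvLoop, hbs, hfind]]
      rw [greedy_find _ p u c hfind]
      apply ih
      have hlt := filter_length_lt (pvCand matrix threshold) (pvFree u)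
        (pvFree (PySem.Set.add (PySem.Set.add u c.1) c.2.1))
        (fun x hx => by
          cases hux : pvFree u x with
          | true => rfl
          | false => rw [pvFree_mono u c x hux] at hx; exact hx)
        c hmem hfreec (pvFree_add_self u c)
      omega

-- ===== VERDICT (by name: the statement is the Claim_ definition above) =====
theorem get_strong_pairs_spec : Claim_equal_get_strong_pairs := by
  intro matrix threshold _ _
  unfold Spec_get_strong_pairs get_strong_pairs_alt
  rw [getA_eq]
  exact main_lemma matrix threshold _ [] PySem.Set.empty
    (Nat.lt_succ_of_le (le_trans (List.length_filter_le _ _) (cand_length_le matrix threshold)))
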